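-- pv_equiv track=rewrite | github.com/greatscottgadgets/hackrf | firmware/fpga/dsp/mcm.py | to_csd
-- ===== SOURCE A (Python) =====
-- def to_csd(n):
--     """ Convert integer to Canonical Signed Digit representation (LSB first). """
--     if n == 0:
--         return [0]
--
--     sign = n < 0
--     n = abs(n)
--     binary = [ int(b) for b in f"{n:b}" ][::-1]
--
--     # Apply CSD conversion algorithm.
--     binary_padded = binary + [0]
--     carry = 0
--     csd = []
--     for i, bit in enumerate(binary_padded):
--         nextbit = binary_padded[i+1] if i+1 < len(binary_padded) else 0
--         d = bit ^ carry
--         ys = nextbit & d  # sign bit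
--         yd = ~nextbit & d  # data bit
--         csd.append(yd - ys)
--         carry = (bit & nextbit) | ((bit|nextbit)&carry)
--     if sign:
--         csd = [-1*c for c in csd]
--
--     # Remove trailing zeros.
--     while len(csd) > 1 and csd[-1] == 0:
--         csd.pop()
--
--     # Regular binary representation is preferred if the number
--     # of additions was not improved.
--     if sum(binary) <= sum(abs(d) for d in csd) - sign:
--         if sign:
--             return [ -d for d in binary ]
--         return binary
--
--     return csd
-- ===== SOURCE B (Python) =====
-- def to_csd(n):
--     """ Convert integer to Canonical Signed Digit representation (LSB first). """
--     if n == 0: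
--         return [0]
--     m = abs(n)
--     # plain binary digits, LSB first, by repeated halving
--     bits = []
--     t = m
--     while t:
--         bits.append(t & 1)
--         t >>= 1
--     # non-adjacent form (CSD) by direct mod-4 reduction
--     naf = []
--     t = m
--     while t:
--         if t & 1:
--             z = 2 - (t & 3)
--             naf.append(z)
--             t -= z
--         else:
--             naf.append(0)
--         t >>= 1
--     s = -1 if n < 0 else 1
--     # prefer plain binary when the nonzero-digit count is not improved
--     if sum(bits) <= sum(abs(d) for d in naf) - (n < 0):
--         return [s * b for b in bits]
--     return [s * d for d in naf]
-- ===== Notes on version B (the rewrite author's own statement) =====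
-- stated objective: alternative
-- what changed: The bitwise carry-propagation fold over an enumerated zero-padded bit list is replaced by a direct non-adjacent-form reduction on the running integer (an odd step emits the signed unit digit picked by the residue modulo four and subtracts it, an even step emits a zero digit, then the integer is halved), which never produces trailing zeros, so the string-format/reverse bit extraction, the index lookahead, the carry logic and the trailing-zero pop loop all disappear; the plain-binary-preference comparison is kept.
import Mathlib
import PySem

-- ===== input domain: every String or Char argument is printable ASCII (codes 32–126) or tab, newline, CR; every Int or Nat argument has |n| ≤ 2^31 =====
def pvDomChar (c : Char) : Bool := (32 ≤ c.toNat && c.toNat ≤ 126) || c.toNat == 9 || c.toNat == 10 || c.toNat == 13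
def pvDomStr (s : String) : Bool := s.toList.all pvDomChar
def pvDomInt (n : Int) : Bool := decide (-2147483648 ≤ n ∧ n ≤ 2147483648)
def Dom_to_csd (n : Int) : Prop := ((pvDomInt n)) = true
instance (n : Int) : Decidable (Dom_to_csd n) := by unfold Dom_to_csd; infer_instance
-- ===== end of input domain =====

-- B replaces A's enumerated carry-propagation fold (and its trailing-zero pop loop) by a direct
-- mod-4 NAF reduction on the running integer; same values everywhere (alternative decomposition).

-- ===== PORT A =====
-- while len(csd) > 1 and csd[-1] == 0: csd.pop()  (each pass pops one element, so
-- csd.length passes of fuel always cover the whole loop; the fuel is only a totality guard)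
def stripGo : Nat → List Int → List Int
  | 0, csd => csd
  | f + 1, csd => if csd.length > 1 ∧ csd.getLast? = some 0 then stripGo f csd.dropLast else csd

def stripA (csd : List Int) : List Int := stripGo csd.length csd

-- the body of A's 'for i, bit in enumerate(binary_padded)' loop (state: carry, csd)
def stepA (L : List Int) (st : Int × List Int) (p : Int × Int) : Int × List Int :=
  let carry := st.1
  let i := p.1
  let bit := p.2
  -- binary_padded[i+1] if i+1 < len(binary_padded) else 0 (the guard keeps the index in range)
  let nextbit : Int := if i + 1 < (L.length : Int) then (PySem.List.pyGet? L (i + 1)).getD 0 else 0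
  let d := PySem.Int.bxor bit carry
  let ys := PySem.Int.band nextbit d
  let yd := PySem.Int.band (Int.not nextbit) d
  (PySem.Int.bor (PySem.Int.band bit nextbit) (PySem.Int.band (PySem.Int.bor bit nextbit) carry),
   st.2 ++ [yd - ys])

def to_csd (n : Int) : List Int :=
  if n = 0 then [0] else
  let sign : Bool := decide (n < 0)
  let na : Int := |n|
  -- f"{na:b}" is PySem.Int.toBinChars; int(b) on a one-digit string is PySem.Int.ofChars? [b];
  -- [::-1] is reverse (PySem.List.slice?_none_none_neg_one)
  let binary : List Int := ((PySem.Int.toBinChars na).map (fun b => (PySem.Int.ofChars? [b]).getD 0)).reverse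
  let binary_padded := binary ++ [0]
  let r := (PySem.List.enumerate binary_padded).foldl (stepA binary_padded) (0, ([] : List Int))
  let csd1 := if sign then r.2.map (fun c => -1 * c) else r.2
  let csd := stripA csd1
  if binary.sum ≤ (csd.map (fun d => |d|)).sum - (if sign then 1 else 0) then
    (if sign then binary.map (fun d => -d) else binary)
  else csd

-- ===== PORT B =====
-- while t: bits.append(t & 1); t >>= 1   (t = abs(n) ≥ 0, so 'while t' is 'while t > 0';
-- t halves each pass, so t.toNat + 1 passes of fuel always cover the loop: a totality guard only)
def altBitsGo : Nat → Int → List Int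
  | 0, _ => []
  | f + 1, t => if 0 < t then PySem.Int.band t 1 :: altBitsGo f (t >>> (1 : Nat)) else []

def altBits (t : Int) : List Int := altBitsGo (t.toNat + 1) t

-- while t: if t & 1: z = 2 - (t & 3); append z; t -= z else append 0; t >>= 1
-- (t at least halves each pass, so t.toNat + 1 passes of fuel always cover the loop)
def altNafGo : Nat → Int → List Int
  | 0, _ => []
  | f + 1, t =>
    if 0 < t then
      if PySem.Int.band t 1 ≠ 0 then
        (2 - PySem.Int.band t 3) :: altNafGo f ((t - (2 - PySem.Int.band t 3)) >>> (1 : Nat))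
      else 0 :: altNafGo f (t >>> (1 : Nat))
    else []

def altNaf (t : Int) : List Int := altNafGo (t.toNat + 1) t

def to_csd_alt (n : Int) : List Int :=
  if n = 0 then [0] else
  let m := |n|
  let bits := altBits m
  let naf := altNaf m
  let s : Int := if n < 0 then -1 else 1
  if bits.sum ≤ (naf.map (fun d => |d|)).sum - (if n < 0 then 1 else 0) then
    bits.map (fun b => s * b)
  else naf.map (fun d => s * d)

-- ===== PRECONDITION & SPEC =====
def Spec_to_csd (n : Int) (out : List Int) : Prop := out = to_csd_alt n
instance (n : Int) (out : List Int) : Decidable (Spec_to_csd n out) := by unfold Spec_to_csd; infer_instance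

-- ===== CLAIM (what is proved, stated in full; the proofs are below) =====
def Claim_equal_to_csd : Prop := ∀ (n : Int), Dom_to_csd n → Spec_to_csd n (to_csd n)

-- ===== LEMMAS AND PROOFS =====

-- binary digits of m, LSB first (the mathematical skeleton shared by both ports)
def bitsI (m : Nat) : List Int :=
  if m = 0 then [] else ((m % 2 : Nat) : Int) :: bitsI (m / 2)
decreasing_by omega

-- non-adjacent form of m, LSB first
def nafN (m : Nat) : List Int :=
  if m = 0 then []
  else if m % 4 = 1 then 1 :: nafN (m / 2)
  else if m % 4 = 3 then -1 :: nafN (m / 2 + 1)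
  else 0 :: nafN (m / 2)
decreasing_by all_goals omega

-- A's carry loop, reformulated as recursion on the integer (c = carry)
def gA (m : Nat) (c : Bool) : List Int :=
  if m = 0 then [if c then 1 else 0]
  else
    (if ((m % 2 == 1) != c) then (if m / 2 % 2 == 1 then (-1 : Int) else 1) else 0) ::
      gA (m / 2) ((m % 2 == 1 && m / 2 % 2 == 1) || ((m % 2 == 1 || m / 2 % 2 == 1) && c))
decreasing_by omega

-- A's loop with the lookahead read from the suffix itself
def loopP : List Int → Int → Int × List Int
  | [], c => (c, [])
  | b :: rest, c =>
    let nx := rest.headD 0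
    let d := PySem.Int.bxor b c
    let ys := PySem.Int.band nx d
    let yd := PySem.Int.band (Int.not nx) d
    let r := loopP rest (PySem.Int.bor (PySem.Int.band b nx) (PySem.Int.band (PySem.Int.bor b nx) c))
    (r.1, (yd - ys) :: r.2)

lemma step_digit (bit nx c : Int) (hb : bit = 0 ∨ bit = 1) (hn : nx = 0 ∨ nx = 1)
    (hc : c = 0 ∨ c = 1) :
    (PySem.Int.band (Int.not nx) (PySem.Int.bxor bit c) - PySem.Int.band nx (PySem.Int.bxor bit c)
       = (if ((bit == 1) != (c == 1)) then (if nx == 1 then (-1 : Int) else 1) else 0))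
    ∧ (PySem.Int.bor (PySem.Int.band bit nx) (PySem.Int.band (PySem.Int.bor bit nx) c)
       = (if ((bit == 1 && nx == 1) || ((bit == 1 || nx == 1) && (c == 1))) then (1 : Int) else 0)) := by
  rcases hb with rfl | rfl <;> rcases hn with rfl | rfl <;> rcases hc with rfl | rfl <;>
    exact ⟨by decide, by decide⟩

lemma fold_stepA (L : List Int) :
    ∀ (t : List Int) (k : Nat) (c : Int) (acc : List Int), L.drop k = t →
      (PySem.List.enumerate t (k : Int)).foldl (stepA L) (c, acc)
        = ((loopP t c).1, acc ++ (loopP t c).2) := by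
  intro t
  induction t with
  | nil => intro k c acc h; simp [PySem.List.enumerate_nil, loopP]
  | cons b rest ih =>
    intro k c acc h
    have hlen : L.length = k + 1 + rest.length := by
      have h1 : (L.drop k).length = rest.length + 1 := by rw [h]; simp
      simp only [List.length_drop] at h1
      have h2 : k ≤ L.length := by
        by_contra hc
        have : L.drop k = [] := List.drop_eq_nil_of_le (by omega)
        rw [h] at this; simp at this
      omega
    have hdrop : L.drop (k + 1) = rest := by
      have ht : (L.drop k).tail = L.drop (k + 1) := List.tail_drop
      rw [h] at ht; simpa using ht.symm
    have hnext : (if (k : Int) + 1 < (L.length : Int) then (PySem.List.pyGet? L ((k : Int) + 1)).getD 0 else 0)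
        = rest.headD 0 := by
      rcases rest with _ | ⟨r0, rs⟩
      · rw [if_neg]
        · simp
        · simp at hlen; omega
      · have hlt : (k : Int) + 1 < (L.length : Int) := by simp at hlen; omega
        rw [if_pos hlt, show ((k : Int) + 1) = ((k + 1 : Nat) : Int) from by omega,
          PySem.List.pyGet?_natCast]
        have h0 : L[k + 1]? = some r0 := by
          have hd : (L.drop (k + 1))[0]? = some r0 := by rw [hdrop]; rfl
          rw [List.getElem?_drop] at hd
          simpa using hd
        simp [h0]
    rw [PySem.List.enumerate_cons, List.foldl_cons]
    have hstep : stepA L (c, acc) ((k : Int), b)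
        = (PySem.Int.bor (PySem.Int.band b (rest.headD 0)) (PySem.Int.band (PySem.Int.bor b (rest.headD 0)) c),
           acc ++ [PySem.Int.band (Int.not (rest.headD 0)) (PySem.Int.bxor b c)
             - PySem.Int.band (rest.headD 0) (PySem.Int.bxor b c)]) := by
      simp only [stepA]
      rw [hnext]
    rw [hstep, show ((k : Int) + 1) = ((k + 1 : Nat) : Int) from by omega,
      ih (k + 1) _ _ hdrop]
    simp only [loopP]
    simp [List.append_assoc]

lemma bitsI_mem : ∀ (m : Nat) (x : Int), x ∈ bitsI m → x = 0 ∨ x = 1 := by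
  intro m
  induction m using Nat.strong_induction_on with
  | _ m ih =>
    intro x hx
    rw [bitsI] at hx
    by_cases h : m = 0
    · simp [h] at hx
    · simp [h] at hx
      rcases hx with h1 | h1
      · omega
      · exact ih (m / 2) (by omega) x h1

lemma toDigitsCore_two : ∀ (fuel m : Nat) (ds : List Char), 0 < m → m < fuel →
    Nat.toDigitsCore 2 fuel m ds
      = ((bitsI m).map (fun i => Nat.digitChar i.toNat)).reverse ++ ds := by
  intro fuel
  induction fuel with
  | zero => intro m ds h1 h2; omega
  | succ f ih =>
    intro m ds h1 h2
    rw [Nat.toDigitsCore]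
    by_cases h0 : m / 2 = 0
    · have hm1 : m = 1 := by omega
      subst hm1
      norm_num
      rw [bitsI]
      norm_num
      rw [bitsI]
      rfl
    · rw [if_neg (by omega : ¬ m / 2 = 0)]
      rw [ih (m / 2) _ (by omega) (by omega)]
      conv_rhs => rw [bitsI, if_neg (by omega : ¬ m = 0)]
      simp only [List.map_cons, List.reverse_cons, List.append_assoc]
      rfl

lemma binaryA (m : Nat) (h : 0 < m) :
    ((PySem.Int.toBinChars (m : Int)).map (fun b => (PySem.Int.ofChars? [b]).getD 0)).reverse
      = bitsI m := by
  have hne : ¬ ((m : Int) < 0) := by omega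
  rw [PySem.Int.toBinChars, if_neg hne, Int.toNat_natCast, Nat.toDigits,
    toDigitsCore_two (m + 1) m [] h (by omega)]
  simp only [List.append_nil, List.map_reverse, List.reverse_reverse, List.map_map]
  rw [List.map_congr_left (g := id), List.map_id]
  intro x hx
  rcases bitsI_mem m x hx with h0 | h0 <;> subst h0 <;> decide

lemma headD_pad (u : Nat) : ((bitsI u) ++ [0]).headD 0 = ((u % 2 : Nat) : Int) := by
  rw [bitsI]
  by_cases h : u = 0 <;> simp [h]

lemma beq_cast_one (u : Nat) (hu : u = 0 ∨ u = 1) : (((u : Nat) : Int) == (1 : Int)) = (u == 1) := by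
  rcases hu with rfl | rfl <;> decide

lemma beq_ite_one (c : Bool) : ((if c then (1 : Int) else 0) == (1 : Int)) = c := by
  cases c <;> decide

lemma loopP_gA : ∀ (m : Nat) (c : Bool),
    loopP (bitsI m ++ [0]) (if c then 1 else 0) = (0, gA m c) := by
  intro m
  induction m using Nat.strong_induction_on with
  | _ m ih =>
    intro c
    by_cases h : m = 0
    · subst h
      rw [bitsI, gA]
      cases c <;> decide
    · rw [bitsI, if_neg h, gA, if_neg h, List.cons_append]
      simp only [loopP, headD_pad]
      obtain ⟨hd, hc⟩ := step_digit ((m % 2 : Nat) : Int) ((m / 2 % 2 : Nat) : Int)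
        (if c then 1 else 0)
        (by rcases Nat.mod_two_eq_zero_or_one m with h2 | h2 <;> rw [h2] <;> simp)
        (by rcases Nat.mod_two_eq_zero_or_one (m / 2) with h4 | h4 <;> rw [h4] <;> simp)
        (by cases c <;> simp)
      rw [hd, hc, beq_cast_one _ (Nat.mod_two_eq_zero_or_one m),
        beq_cast_one _ (Nat.mod_two_eq_zero_or_one (m / 2)), beq_ite_one,
        ih (m / 2) (by omega)]

lemma nafN_last : ∀ s : Nat, 0 < s → nafN s ≠ [] ∧ (nafN s).getLast? ≠ some 0 := by
  intro s
  induction s using Nat.strong_induction_on with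
  | _ s ih =>
    intro hs
    have hnil : ∀ u : Nat, u < s → nafN u = [] → u = 0 := by
      intro u hu hu0
      by_contra hne
      exact (ih u hu (by omega)).1 hu0
    rw [nafN]
    have hs0 : ¬ s = 0 := by omega
    by_cases h1 : s % 4 = 1
    · rw [if_neg hs0, if_pos h1]
      refine ⟨by simp, ?_⟩
      rcases hl : nafN (s / 2) with _ | ⟨x, xs⟩
      · simp
      · rw [List.getLast?_cons_cons]
        have hpos : 0 < s / 2 := by
          by_contra hc
          have : s / 2 = 0 := by omega
          rw [this] at hl; rw [nafN] at hl; simp at hl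
        rw [← hl]
        exact (ih (s / 2) (by omega) hpos).2
    · by_cases h3 : s % 4 = 3
      · rw [if_neg hs0, if_neg h1, if_pos h3]
        refine ⟨by simp, ?_⟩
        rcases hl : nafN (s / 2 + 1) with _ | ⟨x, xs⟩
        · exact absurd (hnil (s / 2 + 1) (by omega) hl) (by omega)
        · rw [List.getLast?_cons_cons, ← hl]
          exact (ih (s / 2 + 1) (by omega) (by omega)).2
      · rw [if_neg hs0, if_neg h1, if_neg h3]
        refine ⟨by simp, ?_⟩
        rcases hl : nafN (s / 2) with _ | ⟨x, xs⟩
        · exact absurd (hnil (s / 2) (by omega) hl) (by omega)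
        · rw [List.getLast?_cons_cons, ← hl]
          exact (ih (s / 2) (by omega) (by omega)).2

lemma gA_nafN : ∀ (m : Nat) (c : Bool),
    ∃ k, gA m c = nafN (m + (if c then 1 else 0)) ++ List.replicate k 0 := by
  intro m
  induction m using Nat.strong_induction_on with
  | _ m ih =>
    intro c
    by_cases h : m = 0
    · subst h
      cases c
      · exact ⟨1, by rw [gA, nafN]; rfl⟩
      · have h1 : nafN 1 = [1] := by simp [nafN]
        exact ⟨0, by rw [gA]; norm_num [h1]⟩
    · rcases Nat.mod_two_eq_zero_or_one m with h2 | h2 <;>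
        rcases Nat.mod_two_eq_zero_or_one (m / 2) with h4 | h4 <;> cases c
      -- bit 0, nx 0, c false
      · obtain ⟨k, hk⟩ := ih (m / 2) (by omega) false
        refine ⟨k, ?_⟩
        rw [gA, if_neg h]
        simp only [h2, h4]
        norm_num [show ((0 : Nat) == (1 : Nat)) = false from rfl,
          show ((1 : Nat) == (1 : Nat)) = true from rfl]
        rw [hk, show nafN m = 0 :: nafN (m / 2) from by
          rw [nafN, if_neg h, if_neg (by omega), if_neg (by omega)]]
        simp
      -- bit 0, nx 0, c true
      · obtain ⟨k, hk⟩ := ih (m / 2) (by omega) false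
        refine ⟨k, ?_⟩
        rw [gA, if_neg h]
        simp only [h2, h4]
        norm_num [show ((0 : Nat) == (1 : Nat)) = false from rfl,
          show ((1 : Nat) == (1 : Nat)) = true from rfl]
        rw [hk, show nafN (m + 1) = 1 :: nafN (m / 2) from by
          rw [nafN, if_neg (by omega), if_pos (by omega), show (m + 1) / 2 = m / 2 from by omega]]
        simp
      -- bit 0, nx 1, c false
      · obtain ⟨k, hk⟩ := ih (m / 2) (by omega) false
        refine ⟨k, ?_⟩
        rw [gA, if_neg h]
        simp only [h2, h4]
        norm_num [show ((0 : Nat) == (1 : Nat)) = false from rfl,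
          show ((1 : Nat) == (1 : Nat)) = true from rfl]
        rw [hk, show nafN m = 0 :: nafN (m / 2) from by
          rw [nafN, if_neg h, if_neg (by omega), if_neg (by omega)]]
        simp
      -- bit 0, nx 1, c true
      · obtain ⟨k, hk⟩ := ih (m / 2) (by omega) true
        refine ⟨k, ?_⟩
        rw [gA, if_neg h]
        simp only [h2, h4]
        norm_num [show ((0 : Nat) == (1 : Nat)) = false from rfl,
          show ((1 : Nat) == (1 : Nat)) = true from rfl]
        rw [hk, show nafN (m + 1) = -1 :: nafN (m / 2 + 1) from by
          rw [nafN, if_neg (by omega), if_neg (by omega), if_pos (by omega),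
            show (m + 1) / 2 = m / 2 from by omega]]
        simp
      -- bit 1, nx 0, c false
      · obtain ⟨k, hk⟩ := ih (m / 2) (by omega) false
        refine ⟨k, ?_⟩
        rw [gA, if_neg h]
        simp only [h2, h4]
        norm_num [show ((0 : Nat) == (1 : Nat)) = false from rfl,
          show ((1 : Nat) == (1 : Nat)) = true from rfl]
        rw [hk, show nafN m = 1 :: nafN (m / 2) from by
          rw [nafN, if_neg h, if_pos (by omega)]]
        simp
      -- bit 1, nx 0, c true
      · obtain ⟨k, hk⟩ := ih (m / 2) (by omega) true
        refine ⟨k, ?_⟩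
        rw [gA, if_neg h]
        simp only [h2, h4]
        norm_num [show ((0 : Nat) == (1 : Nat)) = false from rfl,
          show ((1 : Nat) == (1 : Nat)) = true from rfl]
        rw [hk, show nafN (m + 1) = 0 :: nafN (m / 2 + 1) from by
          rw [nafN, if_neg (by omega), if_neg (by omega), if_neg (by omega),
            show (m + 1) / 2 = m / 2 + 1 from by omega]]
        simp
      -- bit 1, nx 1, c false
      · obtain ⟨k, hk⟩ := ih (m / 2) (by omega) true
        refine ⟨k, ?_⟩
        rw [gA, if_neg h]
        simp only [h2, h4]
        norm_num [show ((0 : Nat) == (1 : Nat)) = false from rfl,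
          show ((1 : Nat) == (1 : Nat)) = true from rfl]
        rw [hk, show nafN m = -1 :: nafN (m / 2 + 1) from by
          rw [nafN, if_neg h, if_neg (by omega), if_pos (by omega)]]
        simp
      -- bit 1, nx 1, c true
      · obtain ⟨k, hk⟩ := ih (m / 2) (by omega) true
        refine ⟨k, ?_⟩
        rw [gA, if_neg h]
        simp only [h2, h4]
        norm_num [show ((0 : Nat) == (1 : Nat)) = false from rfl,
          show ((1 : Nat) == (1 : Nat)) = true from rfl]
        rw [hk, show nafN (m + 1) = 0 :: nafN (m / 2 + 1) from by
          rw [nafN, if_neg (by omega), if_neg (by omega), if_neg (by omega),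
            show (m + 1) / 2 = m / 2 + 1 from by omega]]
        simp

lemma strip_go_pad : ∀ (k f : Nat) (l : List Int), k ≤ f → l ≠ [] → l.getLast? ≠ some 0 →
    stripGo f (l ++ List.replicate k 0) = l := by
  intro k
  induction k with
  | zero =>
    intro f l _ h1 h2
    cases f with
    | zero => simp [stripGo]
    | succ f =>
      simp only [List.replicate_zero, List.append_nil]
      rw [stripGo, if_neg]
      intro hc
      exact h2 hc.2
  | succ k ih =>
    intro f l hkf h1 h2
    cases f with
    | zero => omega
    | succ f =>
      rw [List.replicate_succ', ← List.append_assoc, stripGo,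
        if_pos ⟨by have := List.length_pos_of_ne_nil h1; simp; omega, by simp⟩,
        List.dropLast_concat]
      exact ih f l (by omega) h1 h2

lemma strip_pad (k : Nat) (l : List Int) (h1 : l ≠ []) (h2 : l.getLast? ≠ some 0) :
    stripA (l ++ List.replicate k 0) = l := by
  rw [stripA]
  exact strip_go_pad k _ l (by simp) h1 h2

lemma cast_div_two (a : Nat) : ((a : Int)) / (((2 : Nat) ^ 1 : Nat) : Int) = ((a / 2 : Nat) : Int) := by
  norm_num

lemma nat_and_three (x : Nat) : x &&& 3 = x % 4 := by
  have := Nat.and_two_pow_sub_one_eq_mod x 2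
  norm_num at this
  omega

lemma altBitsGo_eq : ∀ (f m : Nat), m < f → altBitsGo f (m : Int) = bitsI m := by
  intro f
  induction f with
  | zero => intro m hm; omega
  | succ f ih =>
    intro m hm
    rw [altBitsGo, bitsI]
    by_cases h : m = 0
    · simp [h]
    · have hpos : (0 : Int) < (m : Int) := by exact_mod_cast Nat.pos_of_ne_zero h
      rw [if_pos hpos, if_neg h]
      have hb : PySem.Int.band (m : Int) 1 = ((m % 2 : Nat) : Int) := by
        rw [show (1 : Int) = ((1 : Nat) : Int) from rfl, PySem.Int.band_natCast]
        simp [Nat.and_one_is_mod]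
      have hs : (m : Int) >>> (1 : Nat) = ((m / 2 : Nat) : Int) := by
        rw [Int.shiftRight_eq_div_pow, cast_div_two]
      rw [hb, hs, ih (m / 2) (by omega)]

lemma altBits_eq : ∀ m : Nat, altBits (m : Int) = bitsI m := by
  intro m
  rw [altBits, Int.toNat_natCast]
  exact altBitsGo_eq (m + 1) m (by omega)

lemma altNafGo_eq : ∀ (f m : Nat), m < f → altNafGo f (m : Int) = nafN m := by
  intro f
  induction f with
  | zero => intro m hm; omega
  | succ f ihf =>
    intro m hm
    have ih : ∀ u : Nat, u < m → u < f → altNafGo f (u : Int) = nafN u := fun u _ hu2 => ihf u hu2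
    rw [altNafGo, nafN]
    by_cases h : m = 0
    · simp [h]
    · have hpos : (0 : Int) < (m : Int) := by exact_mod_cast Nat.pos_of_ne_zero h
      rw [if_pos hpos]
      have hb1 : PySem.Int.band (m : Int) 1 = ((m % 2 : Nat) : Int) := by
        rw [show (1 : Int) = ((1 : Nat) : Int) from rfl, PySem.Int.band_natCast]
        simp [Nat.and_one_is_mod]
      have hb3 : PySem.Int.band (m : Int) 3 = ((m % 4 : Nat) : Int) := by
        rw [show (3 : Int) = ((3 : Nat) : Int) from rfl, PySem.Int.band_natCast, nat_and_three]
      by_cases h1 : m % 4 = 1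
      · have hodd : PySem.Int.band (m : Int) 1 ≠ 0 := by rw [hb1]; omega
        rw [if_pos hodd, if_neg h, if_pos h1, hb3, h1]
        have hz : (2 - ((1 : Nat) : Int)) = 1 := by norm_num
        have hsub : ((m : Int) - (2 - ((1 : Nat) : Int))) = ((m - 1 : Nat) : Int) := by
          push_cast; omega
        rw [hsub, Int.shiftRight_eq_div_pow, cast_div_two,
          show (m - 1) / 2 = m / 2 from by omega, ih (m / 2) (by omega) (by omega)]
        norm_num
      · by_cases h3 : m % 4 = 3
        · have hodd : PySem.Int.band (m : Int) 1 ≠ 0 := by rw [hb1]; omega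
          rw [if_pos hodd, if_neg h, if_neg h1, if_pos h3, hb3, h3]
          have hsub : ((m : Int) - (2 - ((3 : Nat) : Int))) = ((m + 1 : Nat) : Int) := by
            push_cast; omega
          rw [hsub, Int.shiftRight_eq_div_pow, cast_div_two,
            show (m + 1) / 2 = m / 2 + 1 from by omega, ih (m / 2 + 1) (by omega) (by omega)]
          norm_num
        · have heven : ¬ PySem.Int.band (m : Int) 1 ≠ 0 := by rw [hb1]; omega
          rw [if_neg heven, if_neg h, if_neg h1, if_neg h3, Int.shiftRight_eq_div_pow,
            cast_div_two, ih (m / 2) (by omega) (by omega)]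

lemma altNaf_eq : ∀ m : Nat, altNaf (m : Int) = nafN m := by
  intro m
  rw [altNaf, Int.toNat_natCast]
  exact altNafGo_eq (m + 1) m (by omega)

-- ===== VERDICT (by name: the statement is the Claim_ definition above) =====
theorem to_csd_spec : Claim_equal_to_csd := by
  unfold Claim_equal_to_csd
  intro n _
  unfold Spec_to_csd
  by_cases hn : n = 0
  · simp [to_csd, to_csd_alt, hn]
  · obtain ⟨mN, hmN⟩ : ∃ m : Nat, ((m : Nat) : Int) = |n| :=
      ⟨(|n|).toNat, Int.toNat_of_nonneg (abs_nonneg n)⟩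
    have hmpos : 0 < mN := by have := abs_pos.mpr hn; omega
    obtain ⟨k, hk⟩ := gA_nafN mN false
    norm_num at hk
    obtain ⟨hne, hlast⟩ := nafN_last mN hmpos
    have hf := fold_stepA (bitsI mN ++ [0]) (bitsI mN ++ [0]) 0 0 [] rfl
    norm_num at hf
    have hl := loopP_gA mN false
    norm_num at hl
    rw [hl] at hf
    simp only [to_csd, to_csd_alt]
    rw [if_neg hn, if_neg hn, ← hmN, binaryA mN hmpos, altBits_eq, altNaf_eq, hf]
    simp only []
    by_cases hneg : n < 0
    · have hmapne : (nafN mN).map (fun c : Int => -1 * c) ≠ [] := by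
        simpa using hne
      have hmaplast : ((nafN mN).map (fun c : Int => -1 * c)).getLast? ≠ some 0 := by
        rw [List.getLast?_map]
        intro hcon
        obtain ⟨z, hz1, hz2⟩ := Option.map_eq_some_iff.mp hcon
        have : z = 0 := by omega
        exact hlast (this ▸ hz1)
      have hstrip : stripA ((gA mN false).map (fun c : Int => -1 * c))
          = (nafN mN).map (fun c : Int => -1 * c) := by
        rw [hk, List.map_append]
        have hrep : (List.replicate k (0 : Int)).map (fun c : Int => -1 * c) = List.replicate k 0 := by
          simp
        rw [hrep]
        exact strip_pad k _ hmapne hmaplast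
      simp only [hneg, decide_true, if_true]
      rw [hstrip]
      have habs : (((nafN mN).map (fun c : Int => -1 * c)).map (fun d => |d|)).sum
          = ((nafN mN).map (fun d => |d|)).sum := by
        rw [List.map_map]
        have hcomp : ((fun d : Int => |d|) ∘ fun c : Int => -1 * c) = fun d : Int => |d| := by
          funext x; simp
        rw [hcomp]
      rw [habs]
      have hfun : (fun b : Int => -1 * b) = (fun d : Int => -d) := by funext x; ring
      rw [hfun]
    · have hstrip : stripA (gA mN false) = nafN mN := by
        rw [hk]
        exact strip_pad k _ hne hlast
      simp only [hneg, decide_false, Bool.false_eq_true, if_false]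
      rw [hstrip]
      have hone : ∀ l : List Int, l.map (fun b : Int => 1 * b) = l := by
        intro l; simp
      rw [hone, hone]
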